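-- pv_equiv track=rewrite | github.com/Sandeep-kumaresan/Leetcode | 1st.py | nearest_smallest_and_greatest
-- ===== SOURCE A (Python) =====
-- def nearest_smallest_and_greatest(arr):
--     # Initialize lists to store results
--     nearest_smallest = []
--     nearest_greatest = []
--
--     # Iterate through adjacent pairs
--     for i in range(len(arr) - 1):
--         # Calculate the sum of the current pair
--         pair_sum = arr[i] + arr[i + 1]
--
--         # Find nearest smallest
--         smaller_candidates = [x for x in arr if x < pair_sum]
--         if smaller_candidates:
--             nearest_smallest_value = max(smaller_candidates)
--         else:
--             nearest_smallest_value = None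
--
--         # Find nearest greatest
--         greater_candidates = [x for x in arr if x > pair_sum]
--         if greater_candidates:
--             nearest_greatest_value = min(greater_candidates)
--         else:
--             nearest_greatest_value = None
--
--         # Append results to lists
--         nearest_smallest.append(str(nearest_smallest_value))
--         nearest_greatest.append(str(nearest_greatest_value))
--
--     return [nearest_smallest, nearest_greatest]
-- ===== SOURCE B (Python) =====
-- def nearest_smallest_and_greatest(arr):
--     # Sort once, then binary-search each pair sum's predecessor/successor.
--     s = sorted(arr)
--     n = len(s)
--
--     def bisect_left(v):
--         # index of the first element >= v (hand-written bisect_left)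
--         lo, hi = 0, n
--         while lo < hi:
--             mid = (lo + hi) // 2
--             if s[mid] < v:
--                 lo = mid + 1
--             else:
--                 hi = mid
--         return lo
--
--     def bisect_right(v):
--         # index of the first element > v (hand-written bisect_right)
--         lo, hi = 0, n
--         while lo < hi:
--             mid = (lo + hi) // 2
--             if s[mid] <= v:
--                 lo = mid + 1
--             else:
--                 hi = mid
--         return lo
--
--     nearest_smallest = []
--     nearest_greatest = []
--     for i in range(len(arr) - 1):
--         v = arr[i] + arr[i + 1]
--         i1 = bisect_left(v)
--         nearest_smallest.append(str(s[i1 - 1]) if i1 > 0 else "None")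
--         j = bisect_right(v)
--         nearest_greatest.append(str(s[j]) if j < n else "None")
--     return [nearest_smallest, nearest_greatest]
-- ===== Notes on version B (the rewrite author's own statement) =====
-- stated objective: faster
-- what changed: B sorts the array once and finds each pair sum's nearest smaller/greater element by binary search (hand-written bisect_left/bisect_right), instead of A's per-pair full rescan building filtered candidate lists and taking max/min.
import Mathlib
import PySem

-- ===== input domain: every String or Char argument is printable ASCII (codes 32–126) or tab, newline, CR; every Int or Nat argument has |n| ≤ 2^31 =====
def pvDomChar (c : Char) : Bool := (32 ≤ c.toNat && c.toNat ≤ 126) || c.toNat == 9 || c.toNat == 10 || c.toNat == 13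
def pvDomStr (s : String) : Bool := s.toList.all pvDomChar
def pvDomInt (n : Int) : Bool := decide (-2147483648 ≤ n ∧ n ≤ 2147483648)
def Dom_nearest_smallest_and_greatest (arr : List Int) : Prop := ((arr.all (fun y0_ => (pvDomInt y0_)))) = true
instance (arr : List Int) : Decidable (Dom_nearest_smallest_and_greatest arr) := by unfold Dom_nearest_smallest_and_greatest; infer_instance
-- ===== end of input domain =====

-- B sorts the array once and binary-searches each pair sum's predecessor/successor
-- instead of rescanning the whole array per pair (objective: faster).


-- ===== PORT A =====
-- 'max(smaller_candidates) if smaller_candidates else None', then str(...) of the result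
def nsElemA (arr : List Int) (v : Int) : String :=
  match PySem.List.max? (arr.filter (fun x => decide (x < v))) (fun x => x) with
  | some m => PySem.Int.toStr m
  | none => "None"

-- 'min(greater_candidates) if greater_candidates else None', then str(...) of the result
def ngElemA (arr : List Int) (v : Int) : String :=
  match PySem.List.min? (arr.filter (fun x => decide (v < x))) (fun x => x) with
  | some m => PySem.Int.toStr m
  | none => "None"

def nearest_smallest_and_greatest (arr : List Int) : List (List String) :=
  let r := (PySem.List.pyRange 0 ((arr.length : Int) - 1)).foldl
    (fun (acc : List String × List String) i =>
      let pairSum := PySem.List.pyGetD arr i 0 + PySem.List.pyGetD arr (i + 1) 0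
      (acc.1 ++ [nsElemA arr pairSum], acc.2 ++ [ngElemA arr pairSum]))
    ([], [])
  [r.1, r.2]

-- ===== PORT B =====
-- Source B's hand-written lo/hi binary searches are exactly bisect_left / bisect_right;
-- ported as the corresponding PySem.List.bisectLeft / bisectRight (the same lo/hi halving loop).
def nsElemB (s : List Int) (v : Int) : String :=
  let i1 := PySem.List.bisectLeft s v
  if 0 < i1 then PySem.Int.toStr (s.getD (i1 - 1) 0) else "None"

def ngElemB (s : List Int) (v : Int) : String :=
  let j := PySem.List.bisectRight s v
  if j < s.length then PySem.Int.toStr (s.getD j 0) else "None"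

def nearest_smallest_and_greatest_alt (arr : List Int) : List (List String) :=
  let s := PySem.List.sorted arr (fun x => x) false
  let r := (PySem.List.pyRange 0 ((arr.length : Int) - 1)).foldl
    (fun (acc : List String × List String) i =>
      let v := PySem.List.pyGetD arr i 0 + PySem.List.pyGetD arr (i + 1) 0
      (acc.1 ++ [nsElemB s v], acc.2 ++ [ngElemB s v]))
    ([], [])
  [r.1, r.2]

-- ===== PRECONDITION & SPEC =====
def Spec_nearest_smallest_and_greatest (arr : List Int) (out : List (List String)) : Prop := out = nearest_smallest_and_greatest_alt arr
instance (arr : List Int) (out : List (List String)) : Decidable (Spec_nearest_smallest_and_greatest arr out) := by unfold Spec_nearest_smallest_and_greatest; infer_instance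

-- ===== CLAIM (what is proved, stated in full; the proofs are below) =====
def Claim_equal_nearest_smallest_and_greatest : Prop := ∀ (arr : List Int), Dom_nearest_smallest_and_greatest arr → Spec_nearest_smallest_and_greatest arr (nearest_smallest_and_greatest arr)

-- ===== LEMMAS AND PROOFS =====

-- max of the elements < v equals the predecessor of v in any sorted rearrangement s of arr
theorem nsElem_eq_gen (arr s : List Int) (hmem : ∀ x : Int, x ∈ s ↔ x ∈ arr)
    (hpw : List.Pairwise (fun a b => a ≤ b) s) (v : Int) :
    nsElemA arr v = nsElemB s v := by
  obtain ⟨hle, hlt, hge⟩ := PySem.List.bisectLeft_spec s v hpw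
  have hrhs : nsElemB s v = if 0 < PySem.List.bisectLeft s v then
      PySem.Int.toStr (s.getD (PySem.List.bisectLeft s v - 1) 0) else "None" := rfl
  rw [hrhs]
  unfold nsElemA
  cases hmax : PySem.List.max? (arr.filter (fun x => decide (x < v))) (fun x => x) with
  | none =>
    have hnil : arr.filter (fun x => decide (x < v)) = [] :=
      (PySem.List.max?_eq_none_iff _ _).mp hmax
    have hi0 : PySem.List.bisectLeft s v = 0 := by
      by_contra h
      have h0 : 0 < PySem.List.bisectLeft s v := Nat.pos_of_ne_zero h
      have hlen : PySem.List.bisectLeft s v - 1 < s.length := by omega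
      have hv : s[PySem.List.bisectLeft s v - 1] < v := hlt _ hlen (by omega)
      have harr : s[PySem.List.bisectLeft s v - 1] ∈ arr :=
        (hmem _).mp (List.getElem_mem hlen)
      have : s[PySem.List.bisectLeft s v - 1] ∈ arr.filter (fun x => decide (x < v)) :=
        List.mem_filter.mpr ⟨harr, by simpa using hv⟩
      simp [hnil] at this
    simp [hi0]
  | some m =>
    obtain ⟨hma, hmv⟩ := List.mem_filter.mp (PySem.List.max?_mem hmax)
    have hmv' : m < v := by simpa using hmv
    obtain ⟨k, hk, hkm⟩ := List.mem_iff_getElem.mp ((hmem m).mpr hma)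
    have hki : k < PySem.List.bisectLeft s v := by
      by_contra h
      have := hge k hk (by omega)
      rw [hkm] at this
      omega
    have h0 : 0 < PySem.List.bisectLeft s v := by omega
    have hlen : PySem.List.bisectLeft s v - 1 < s.length := by omega
    have h1 : s[PySem.List.bisectLeft s v - 1] < v := hlt _ hlen (by omega)
    have h2 : s[PySem.List.bisectLeft s v - 1] ∈ arr := (hmem _).mp (List.getElem_mem hlen)
    have h3 : s[PySem.List.bisectLeft s v - 1] ≤ m :=
      PySem.List.max?_isMax hmax _ (List.mem_filter.mpr ⟨h2, by simpa using h1⟩)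
    have h4 : m ≤ s[PySem.List.bisectLeft s v - 1] := by
      have hmono := List.pairwise_iff_getElem.mp hpw
      rcases Nat.lt_or_ge k (PySem.List.bisectLeft s v - 1) with hklt | hkge
      · have := hmono k _ hk hlen hklt
        rw [hkm] at this; exact this
      · have heq : k = PySem.List.bisectLeft s v - 1 := by omega
        subst heq
        rw [← hkm]
    rw [if_pos h0, List.getD_eq_getElem s 0 hlen, le_antisymm h3 h4]

-- min of the elements > v equals the successor of v in any sorted rearrangement s of arr
theorem ngElem_eq_gen (arr s : List Int) (hmem : ∀ x : Int, x ∈ s ↔ x ∈ arr)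
    (hpw : List.Pairwise (fun a b => a ≤ b) s) (v : Int) :
    ngElemA arr v = ngElemB s v := by
  obtain ⟨hle, hlt, hge⟩ := PySem.List.bisectRight_spec s v hpw
  have hrhs : ngElemB s v = if PySem.List.bisectRight s v < s.length then
      PySem.Int.toStr (s.getD (PySem.List.bisectRight s v) 0) else "None" := rfl
  rw [hrhs]
  unfold ngElemA
  cases hmin : PySem.List.min? (arr.filter (fun x => decide (v < x))) (fun x => x) with
  | none =>
    have hnil : arr.filter (fun x => decide (v < x)) = [] :=
      (PySem.List.min?_eq_none_iff _ _).mp hmin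
    have hjn : ¬ PySem.List.bisectRight s v < s.length := by
      intro h
      have hv : v < s[PySem.List.bisectRight s v] := hge _ h (by omega)
      have harr : s[PySem.List.bisectRight s v] ∈ arr := (hmem _).mp (List.getElem_mem h)
      have : s[PySem.List.bisectRight s v] ∈ arr.filter (fun x => decide (v < x)) :=
        List.mem_filter.mpr ⟨harr, by simpa using hv⟩
      simp [hnil] at this
    simp [hjn]
  | some m =>
    obtain ⟨hma, hmv⟩ := List.mem_filter.mp (PySem.List.min?_mem hmin)
    have hmv' : v < m := by simpa using hmv
    obtain ⟨k, hk, hkm⟩ := List.mem_iff_getElem.mp ((hmem m).mpr hma)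
    have hjk : PySem.List.bisectRight s v ≤ k := by
      by_contra h
      have := hlt k hk (by omega)
      rw [hkm] at this
      omega
    have hjlen : PySem.List.bisectRight s v < s.length := by omega
    have h1 : v < s[PySem.List.bisectRight s v] := hge _ hjlen (by omega)
    have h2 : s[PySem.List.bisectRight s v] ∈ arr := (hmem _).mp (List.getElem_mem hjlen)
    have h3 : m ≤ s[PySem.List.bisectRight s v] :=
      PySem.List.min?_isMin hmin _ (List.mem_filter.mpr ⟨h2, by simpa using h1⟩)
    have h4 : s[PySem.List.bisectRight s v] ≤ m := by
      have hmono := List.pairwise_iff_getElem.mp hpw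
      rcases Nat.lt_or_ge (PySem.List.bisectRight s v) k with hklt | hkge
      · have := hmono _ k hjlen hk hklt
        rw [hkm] at this; exact this
      · have heq : k = PySem.List.bisectRight s v := by omega
        subst heq
        rw [hkm]
    rw [if_pos hjlen, List.getD_eq_getElem s 0 hjlen, le_antisymm h4 h3]

-- ===== VERDICT (by name: the statement is the Claim_ definition above) =====
theorem nearest_smallest_and_greatest_spec : Claim_equal_nearest_smallest_and_greatest := by
  intro arr _
  unfold Spec_nearest_smallest_and_greatest
  have hmem : ∀ x : Int, x ∈ PySem.List.sorted arr (fun x => x) false ↔ x ∈ arr :=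
    fun x => PySem.List.mem_sorted arr (fun x => x) false x
  have hpw : List.Pairwise (fun a b => a ≤ b) (PySem.List.sorted arr (fun x => x) false) :=
    PySem.List.sorted_pairwise arr (fun x => x)
  unfold nearest_smallest_and_greatest nearest_smallest_and_greatest_alt
  simp only [nsElem_eq_gen arr _ hmem hpw, ngElem_eq_gen arr _ hmem hpw]
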